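-- pv_equiv track=rewrite | github.com/Trach-barIlan/course-scheduler | schedule/utils.py | count_hour_gaps
-- ===== SOURCE A (Python) =====
-- DAYS = ["Mon", "Tue", "Wed", "Thu", "Fri"]
--
-- def count_hour_gaps(time_slots):
--     sorted_slots = sorted(time_slots, key=lambda x: (DAYS.index(x[0]), x[1]))
--     gaps = 0
--     prev_day = None
--     prev_end = 0
--     for day, start, end in sorted_slots:
--         if day == prev_day and start > prev_end:
--             gaps += start - prev_end
--         prev_day = day
--         prev_end = end
--     return gaps
-- ===== SOURCE B (Python) =====
-- DAYS = ["Mon", "Tue", "Wed", "Thu", "Fri"]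
--
-- def count_hour_gaps(time_slots):
--     # Bucket slots by day index, then sort and scan each day independently.
--     buckets = {}
--     for day, start, end in time_slots:
--         buckets.setdefault(DAYS.index(day), []).append((start, end))
--     total = 0
--     for i in range(len(DAYS)):
--         prev_end = None
--         for start, end in sorted(buckets.get(i, []), key=lambda p: p[0]):
--             if prev_end is not None and start > prev_end:
--                 total += start - prev_end
--             prev_end = end
--     return total
-- ===== Notes on version B (the rewrite author's own statement) =====
-- stated objective: alternative
-- what changed: Replaces the single global sort by (day index, start) plus one stateful scan tracking prev_day with a dict bucketing pass keyed by DAYS.index(day), then an independent per-day sort-by-start and prev_end scan for each of the five buckets, summing per-day gap totals.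
import Mathlib
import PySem

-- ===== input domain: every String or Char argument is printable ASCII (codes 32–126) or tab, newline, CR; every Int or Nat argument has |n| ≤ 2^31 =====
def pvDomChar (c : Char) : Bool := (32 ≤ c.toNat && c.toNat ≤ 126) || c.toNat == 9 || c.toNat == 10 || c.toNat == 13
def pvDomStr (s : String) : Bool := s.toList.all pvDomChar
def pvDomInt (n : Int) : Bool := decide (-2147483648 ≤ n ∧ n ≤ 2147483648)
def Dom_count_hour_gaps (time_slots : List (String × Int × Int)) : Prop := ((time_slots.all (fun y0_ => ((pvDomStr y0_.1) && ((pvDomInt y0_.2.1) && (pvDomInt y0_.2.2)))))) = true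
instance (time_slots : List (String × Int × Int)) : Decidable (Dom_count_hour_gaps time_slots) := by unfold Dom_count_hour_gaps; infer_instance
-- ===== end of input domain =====

-- B groups the slots into per-day buckets (dict keyed by DAYS.index) and runs an
-- independent sort-by-start + prev_end scan per day, instead of A's single global
-- sort by (day index, start) followed by one scan tracking prev_day.

def pyDAYS : List String := ["Mon", "Tue", "Wed", "Thu", "Fri"]

-- DAYS.index(s) as used by both programs (total stand-in; Pre_ guarantees s ∈ pyDAYS)
def chgDayIdx (s : String) : Int := (((PySem.List.index? pyDAYS s).getD 0 : Nat) : Int)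

-- ===== PORT A =====
-- loop body of A's single scan: state (gaps, prev_day, prev_end)
def chgStepA (st : Int × Option String × Int) (t : String × Int × Int) : Int × Option String × Int :=
  (if (match st.2.1 with | some d => t.1 == d | none => false) && decide (st.2.2 < t.2.1)
     then st.1 + (t.2.1 - st.2.2) else st.1,
   some t.1, t.2.2)

def count_hour_gaps (time_slots : List (String × Int × Int)) : Int :=
  let sorted_slots := PySem.List.sorted2 time_slots (fun x => chgDayIdx x.1) (fun x => x.2.1)
  (sorted_slots.foldl chgStepA (0, none, 0)).1

-- ===== PORT B =====
-- loop body of B's per-day scan: state (total, prev_end : Option)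
def chgStepB (st : Int × Option Int) (p : Int × Int) : Int × Option Int :=
  (match st.2 with
   | some pe => if decide (pe < p.1) then st.1 + (p.1 - pe) else st.1
   | none => st.1,
   some p.2)

def count_hour_gaps_alt (time_slots : List (String × Int × Int)) : Int :=
  let buckets : PySem.Dict Int (List (Int × Int)) :=
    time_slots.foldl
      (fun d t => d.modify (chgDayIdx t.1) [] (· ++ [(t.2.1, t.2.2)]))
      PySem.Dict.empty
  (PySem.List.pyRange 0 (PySem.List.len pyDAYS) 1).foldl
    (fun total i =>
      ((PySem.List.sorted (buckets.getD i []) (fun p => p.1)).foldl chgStepB (total, none)).1)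
    0

-- ===== PRECONDITION & SPEC =====
-- Pre_ excludes exactly the inputs containing a day string not in DAYS, on which
-- both A and B raise ValueError (DAYS.index).
def Pre_count_hour_gaps (time_slots : List (String × Int × Int)) : Prop :=
  ∀ t ∈ time_slots, t.1 ∈ pyDAYS
instance (time_slots : List (String × Int × Int)) : Decidable (Pre_count_hour_gaps time_slots) := by
  unfold Pre_count_hour_gaps; infer_instance

def pvWitness_count_hour_gaps : (List (String × Int × Int)) :=
  [("Mon", 12, 13), ("Tue", 8, 9), ("Mon", 9, 10)]

def Spec_count_hour_gaps (time_slots : List (String × Int × Int)) (out : Int) : Prop :=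
  out = count_hour_gaps_alt time_slots
instance (time_slots : List (String × Int × Int)) (out : Int) : Decidable (Spec_count_hour_gaps time_slots out) := by
  unfold Spec_count_hour_gaps; infer_instance

-- ===== CLAIM (what is proved, stated in full; the proofs are below) =====
def Claim_equal_count_hour_gaps : Prop := ∀ (time_slots : List (String × Int × Int)), Dom_count_hour_gaps time_slots → Pre_count_hour_gaps time_slots → Spec_count_hour_gaps time_slots (count_hour_gaps time_slots)

-- ===== LEMMAS AND PROOFS =====

-- the lexicographic comparator sorted2 uses for A's (day index, start) key
def lexB (a b : String × Int × Int) : Bool :=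
  decide (chgDayIdx a.1 < chgDayIdx b.1) || (!decide (chgDayIdx b.1 < chgDayIdx a.1) && decide (a.2.1 < b.2.1))

theorem chgDayIdx_bounds (s : String) : 0 ≤ chgDayIdx s ∧ chgDayIdx s < 5 := by
  unfold chgDayIdx
  cases h : PySem.List.index? pyDAYS s with
  | none => simp
  | some k =>
    obtain ⟨hk, -, -⟩ := PySem.List.getElem_of_index?_eq_some h
    have h5 : pyDAYS.length = 5 := rfl
    rw [h5] at hk
    simp only [Option.getD_some]
    omega

theorem chgDayIdx_inj (s u : String) (hs : s ∈ pyDAYS) (hu : u ∈ pyDAYS)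
    (h : chgDayIdx s = chgDayIdx u) : s = u := by
  rw [← PySem.List.index?_isSome_iff (xs := pyDAYS)] at hs hu
  obtain ⟨ks, hks⟩ := Option.isSome_iff_exists.mp hs
  obtain ⟨ku, hku⟩ := Option.isSome_iff_exists.mp hu
  obtain ⟨hk1, he1, -⟩ := PySem.List.getElem_of_index?_eq_some hks
  obtain ⟨hk2, he2, -⟩ := PySem.List.getElem_of_index?_eq_some hku
  unfold chgDayIdx at h
  rw [hks, hku] at h
  simp only [Option.getD_some, Nat.cast_inj] at h
  subst h; rw [← he1, ← he2]

theorem insertBy_skip {α : Type} (b : α → α → Bool) (x : α) (P R : List α)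
    (h : ∀ y ∈ P, b x y = false) :
    PySem.List.insertBy b x (P ++ R) = P ++ PySem.List.insertBy b x R := by
  induction P with
  | nil => simp
  | cons y P ih =>
    simp only [List.cons_append, PySem.List.insertBy, h y (by simp)]
    simp only [Bool.false_eq_true, if_false, List.cons.injEq, true_and]
    exact ih (fun z hz => h z (by simp [hz]))

theorem insertBy_split {α : Type} (b b2 : α → α → Bool) (x : α) (S R : List α)
    (hS : ∀ y ∈ S, b x y = b2 x y) (hR : ∀ y ∈ R, b x y = true) :
    PySem.List.insertBy b x (S ++ R) = PySem.List.insertBy b2 x S ++ R := by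
  induction S with
  | nil =>
    cases R with
    | nil => simp [PySem.List.insertBy]
    | cons y ys => simp [PySem.List.insertBy, hR y (by simp)]
  | cons y S ih =>
    have hy := hS y (by simp)
    simp only [List.cons_append, PySem.List.insertBy, hy]
    cases hb : b2 x y with
    | true => simp
    | false =>
      simp only [Bool.false_eq_true, if_false, List.cons_append, List.cons.injEq, true_and]
      exact ih (fun z hz => hS z (by simp [hz]))

theorem insertBy_map {α β : Type} (f : α → β) (b : α → α → Bool) (b' : β → β → Bool)
    (h : ∀ x y, b' (f x) (f y) = b x y) (x : α) (l : List α) :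
    PySem.List.insertBy b' (f x) (l.map f) = (PySem.List.insertBy b x l).map f := by
  induction l with
  | nil => simp [PySem.List.insertBy]
  | cons y l ih =>
    simp only [List.map_cons, PySem.List.insertBy, h x y]
    cases hb : b x y with
    | true => simp
    | false => simp [ih]

theorem foldl_insertBy_map {α β : Type} (f : α → β) (b : α → α → Bool) (b' : β → β → Bool)
    (h : ∀ x y, b' (f x) (f y) = b x y) (l acc : List α) :
    (l.map f).foldl (fun a y => PySem.List.insertBy b' y a) (acc.map f)
      = (l.foldl (fun a y => PySem.List.insertBy b y a) acc).map f := by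
  induction l generalizing acc with
  | nil => simp
  | cons y l ih =>
    simp only [List.map_cons, List.foldl_cons]
    rw [insertBy_map f b b' h, ih]

theorem sorted_map_pair (bl : List (String × Int × Int)) :
    PySem.List.sorted (bl.map (fun t => (t.2.1, t.2.2))) (fun p => p.1)
      = (PySem.List.sorted bl (fun t => t.2.1)).map (fun t => (t.2.1, t.2.2)) := by
  have := foldl_insertBy_map (fun t : String × Int × Int => (t.2.1, t.2.2))
    (fun a b => decide (a.2.1 < b.2.1)) (fun p q => decide (p.1 < q.1))
    (fun x y => rfl) bl []
  simpa [PySem.List.sorted] using this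

theorem bucket_getD (l : List (String × Int × Int)) (i : Int) :
    (l.foldl (fun d t => d.modify (chgDayIdx t.1) [] (· ++ [(t.2.1, t.2.2)]))
        PySem.Dict.empty).getD i []
      = (l.filter (fun t => chgDayIdx t.1 == i)).map (fun t => (t.2.1, t.2.2)) := by
  rw [show (l.foldl (fun d t => d.modify (chgDayIdx t.1) [] (· ++ [(t.2.1, t.2.2)]))
        PySem.Dict.empty)
      = ((l.map (fun t => (chgDayIdx t.1, (t.2.1, t.2.2)))).foldl
          (fun d p => d.modify p.1 [] (· ++ [p.2])) PySem.Dict.empty) from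
      (List.foldl_map (f := fun t : String × Int × Int => (chgDayIdx t.1, (t.2.1, t.2.2)))
        (g := fun (d : PySem.Dict Int (List (Int × Int))) p => d.modify p.1 [] (· ++ [p.2]))
        (l := l) (init := PySem.Dict.empty)).symm]
  rw [PySem.Dict.getD_foldl_modify_append]
  simp [List.filter_map, Function.comp_def]

theorem sorted_append_singleton (A : List (String × Int × Int)) (x : String × Int × Int) :
    PySem.List.sorted (A ++ [x]) (fun t => t.2.1)
      = PySem.List.insertBy (fun a b => decide (a.2.1 < b.2.1)) x
          (PySem.List.sorted A (fun t => t.2.1)) := by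
  simp [PySem.List.sorted, List.foldl_append]

theorem mem_F (l : List (String × Int × Int)) (j : Int) (y : String × Int × Int)
    (h : y ∈ PySem.List.sorted (l.filter (fun t => chgDayIdx t.1 == j)) (fun t => t.2.1)) :
    chgDayIdx y.1 = j := by
  rw [PySem.List.mem_sorted, List.mem_filter] at h
  exact beq_iff_eq.mp h.2

theorem sorted2_decomp (l : List (String × Int × Int)) :
    l.foldl (fun acc x => PySem.List.insertBy lexB x acc) []
      = (PySem.List.pyRange 0 5 1).flatMap
          (fun i => PySem.List.sorted (l.filter (fun t => chgDayIdx t.1 == i)) (fun t => t.2.1)) := by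
  induction l using List.reverseRecOn with
  | nil => simp [PySem.List.sorted]
  | append_singleton l x ih =>
    rw [List.foldl_append, List.foldl_cons, List.foldl_nil, ih]
    have hb := chgDayIdx_bounds x.1
    have hsplit : PySem.List.pyRange 0 5 1
        = PySem.List.pyRange 0 (chgDayIdx x.1) 1
            ++ chgDayIdx x.1 :: PySem.List.pyRange (chgDayIdx x.1 + 1) 5 1 := by
      rw [PySem.List.pyRange_one_append 0 (chgDayIdx x.1) 5 hb.1 (le_of_lt hb.2),
          PySem.List.pyRange_one_cons hb.2]
    have hfilter_lo : ∀ j ∈ PySem.List.pyRange 0 (chgDayIdx x.1) 1,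
        (l ++ [x]).filter (fun t => chgDayIdx t.1 == j) = l.filter (fun t => chgDayIdx t.1 == j) := by
      intro j hj
      rw [PySem.List.mem_pyRange_one] at hj
      rw [List.filter_append]
      have : ¬ (chgDayIdx x.1 == j) = true := by simp; omega
      simp [this]
    have hfilter_hi : ∀ j ∈ PySem.List.pyRange (chgDayIdx x.1 + 1) 5 1,
        (l ++ [x]).filter (fun t => chgDayIdx t.1 == j) = l.filter (fun t => chgDayIdx t.1 == j) := by
      intro j hj
      rw [PySem.List.mem_pyRange_one] at hj
      rw [List.filter_append]
      have : ¬ (chgDayIdx x.1 == j) = true := by simp; omega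
      simp [this]
    have hfx : (l ++ [x]).filter (fun t => chgDayIdx t.1 == chgDayIdx x.1)
        = l.filter (fun t => chgDayIdx t.1 == chgDayIdx x.1) ++ [x] := by
      rw [List.filter_append]; simp
    rw [hsplit]
    simp only [List.flatMap_append, List.flatMap_cons]
    rw [show List.flatMap
          (fun i => PySem.List.sorted ((l ++ [x]).filter (fun t => chgDayIdx t.1 == i)) (fun t => t.2.1))
          (PySem.List.pyRange 0 (chgDayIdx x.1) 1)
        = List.flatMap
          (fun i => PySem.List.sorted (l.filter (fun t => chgDayIdx t.1 == i)) (fun t => t.2.1))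
          (PySem.List.pyRange 0 (chgDayIdx x.1) 1) from
      List.flatMap_congr (fun j hj => by rw [hfilter_lo j hj])]
    rw [show List.flatMap
          (fun i => PySem.List.sorted ((l ++ [x]).filter (fun t => chgDayIdx t.1 == i)) (fun t => t.2.1))
          (PySem.List.pyRange (chgDayIdx x.1 + 1) 5 1)
        = List.flatMap
          (fun i => PySem.List.sorted (l.filter (fun t => chgDayIdx t.1 == i)) (fun t => t.2.1))
          (PySem.List.pyRange (chgDayIdx x.1 + 1) 5 1) from
      List.flatMap_congr (fun j hj => by rw [hfilter_hi j hj])]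
    rw [hfx, sorted_append_singleton]
    rw [insertBy_skip lexB x _ _ (by
      intro y hy
      rw [List.mem_flatMap] at hy
      obtain ⟨j, hj, hyj⟩ := hy
      rw [PySem.List.mem_pyRange_one] at hj
      have hc := mem_F l j y hyj
      have h1 : ¬ (chgDayIdx x.1 < chgDayIdx y.1) := by omega
      have h2 : chgDayIdx y.1 < chgDayIdx x.1 := by omega
      simp [lexB, h1, h2])]
    rw [insertBy_split lexB (fun a b => decide (a.2.1 < b.2.1)) x _ _
      (by
        intro y hy
        have hc := mem_F l (chgDayIdx x.1) y hy
        simp [lexB, hc])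
      (by
        intro y hy
        rw [List.mem_flatMap] at hy
        obtain ⟨j, hj, hyj⟩ := hy
        rw [PySem.List.mem_pyRange_one] at hj
        have hc := mem_F l j y hyj
        have h1 : chgDayIdx x.1 < chgDayIdx y.1 := by omega
        simp [lexB, h1])]


theorem foldB_snd_isSome (l : List (Int × Int)) (g pe : Int) :
    ∃ x, (l.foldl chgStepB (g, some pe)).2 = some x := by
  induction l generalizing g pe with
  | nil => exact ⟨pe, rfl⟩
  | cons p l ih =>
    simp only [List.foldl_cons, chgStepB]
    exact ih _ _

theorem scanA_inner (rest : List (String × Int × Int)) (d : String) (g pe : Int)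
    (h : ∀ t ∈ rest, t.1 = d) :
    rest.foldl chgStepA (g, some d, pe)
      = (((rest.map (fun t => (t.2.1, t.2.2))).foldl chgStepB (g, some pe)).1, some d,
         ((rest.map (fun t => (t.2.1, t.2.2))).foldl chgStepB (g, some pe)).2.getD pe) := by
  induction rest generalizing g pe with
  | nil => simp
  | cons t rest ih =>
    have ht : t.1 = d := h t (by simp)
    simp only [List.foldl_cons, List.map_cons, chgStepA, chgStepB, ht, beq_self_eq_true,
      Bool.true_and]
    obtain ⟨x, hx⟩ := foldB_snd_isSome (rest.map (fun t => (t.2.1, t.2.2)))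
      (if decide (pe < t.2.1) then g + (t.2.1 - pe) else g) t.2.2
    rw [ih _ _ (fun u hu => h u (by simp [hu])), hx]
    simp

theorem scanA_blocks (bs : List (List (String × Int × Int))) (g : Int) (pd : Option String) (pe : Int)
    (hsame : ∀ B ∈ bs, ∀ t ∈ B, ∀ u ∈ B, t.1 = u.1)
    (hpd : ∀ B ∈ bs, ∀ t ∈ B, pd ≠ some t.1)
    (hdist : List.Pairwise (fun B C => ∀ t ∈ B, ∀ u ∈ C, t.1 ≠ u.1) bs) :
    (bs.flatten.foldl chgStepA (g, pd, pe)).1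
      = bs.foldl (fun acc B => ((B.map (fun t => (t.2.1, t.2.2))).foldl chgStepB (acc, none)).1) g := by
  induction bs generalizing g pd pe with
  | nil => simp
  | cons B bs ih =>
    rw [List.flatten_cons, List.foldl_append, List.foldl_cons]
    cases B with
    | nil =>
      simp only [List.foldl_nil, List.map_nil]
      exact ih g pd pe (fun C hC => hsame C (by simp [hC])) (fun C hC => hpd C (by simp [hC]))
        (List.Pairwise.of_cons hdist)
    | cons t0 rest =>
      have hpd0 : pd ≠ some t0.1 := hpd (t0 :: rest) (by simp) t0 (by simp)
      have hstep : chgStepA (g, pd, pe) t0 = (g, some t0.1, t0.2.2) := by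
        cases pd with
        | none => simp [chgStepA]
        | some d =>
          have hne : ¬ (t0.1 == d) = true := by
            simp only [beq_iff_eq]
            intro he; exact hpd0 (by rw [he])
          simp [chgStepA, hne]
      rw [List.foldl_cons, hstep,
        scanA_inner rest t0.1 g t0.2.2
          (fun u hu => hsame (t0 :: rest) (by simp) u (by simp [hu]) t0 (by simp))]
      simp only [List.map_cons, List.foldl_cons, chgStepB]
      exact ih _ _ _ (fun C hC => hsame C (by simp [hC]))
        (fun C hC u hu he =>
          (List.pairwise_cons.mp hdist).1 C hC t0 (by simp) u hu (Option.some.inj he))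
        (List.Pairwise.of_cons hdist)


theorem mem_F_mem (l : List (String × Int × Int)) (j : Int) (y : String × Int × Int)
    (h : y ∈ PySem.List.sorted (l.filter (fun t => chgDayIdx t.1 == j)) (fun t => t.2.1)) :
    y ∈ l := by
  rw [PySem.List.mem_sorted, List.mem_filter] at h
  exact h.1

theorem main_eq (l : List (String × Int × Int)) (hpre : ∀ t ∈ l, t.1 ∈ pyDAYS) :
    count_hour_gaps l = count_hour_gaps_alt l := by
  unfold count_hour_gaps count_hour_gaps_alt
  have hlen : PySem.List.len pyDAYS = 5 := rfl
  rw [hlen]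
  have hsorted2 : PySem.List.sorted2 l (fun x => chgDayIdx x.1) (fun x => x.2.1)
      = l.foldl (fun acc x => PySem.List.insertBy lexB x acc) [] := rfl
  rw [hsorted2, sorted2_decomp l, List.flatMap_def]
  rw [scanA_blocks _ 0 none 0
    (by
      intro B hB t ht u hu
      rw [List.mem_map] at hB
      obtain ⟨i, hi, rfl⟩ := hB
      exact chgDayIdx_inj t.1 u.1 (hpre t (mem_F_mem l i t ht)) (hpre u (mem_F_mem l i u hu))
        ((mem_F l i t ht).trans (mem_F l i u hu).symm))
    (by intro B hB t ht; simp)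
    (by
      rw [List.pairwise_map]
      refine (PySem.List.pairwise_lt_pyRange_one 0 5).imp ?_
      intro i j hij t ht u hu he
      have h1 := mem_F l i t ht
      have h2 := mem_F l j u hu
      rw [he, h2] at h1
      omega)]
  rw [List.foldl_map]
  exact PySem.List.foldl_congr_mem
    (l := PySem.List.pyRange 0 5 1)
    (f := fun acc i =>
      (((PySem.List.sorted (l.filter (fun t => chgDayIdx t.1 == i)) (fun t => t.2.1)).map
          (fun t => (t.2.1, t.2.2))).foldl chgStepB (acc, none)).1)
    (g := fun total i =>
      ((PySem.List.sorted
          ((l.foldl (fun d t => d.modify (chgDayIdx t.1) [] (· ++ [(t.2.1, t.2.2)]))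
              PySem.Dict.empty).getD i []) (fun p => p.1)).foldl chgStepB (total, none)).1)
    (init := 0)
    (fun acc i _ => by beta_reduce; rw [bucket_getD l i, sorted_map_pair])

-- ===== VERDICT (by name: the statement is the Claim_ definition above) =====
theorem count_hour_gaps_spec : Claim_equal_count_hour_gaps := by
  intro l _ hpre
  unfold Spec_count_hour_gaps
  exact main_eq l hpre
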